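-- pv_equiv track=rewrite | github.com/2D-C0DES/Python | Computer Networks PCA1/PCA1 Programs/Problem6.py | identify_ip_class
-- ===== SOURCE A (Python) =====
-- def identify_ip_class(ip):
--     try:
--         octets = ip.split('.')
--
--         # Check format
--         if len(octets) != 4:
--             return "Invalid IP address format!"
--
--         # Validate octets
--         for octet in octets:
--             if not octet.isdigit() or not 0 <= int(octet) <= 255:
--                 return "Invalid IP address! Each octet must be between 0 and 255."
--
--         first_octet = int(octets[0])
--
--         # Determine class
--         if 1 <= first_octet <= 126:
--             return "Class A"
--         elif first_octet == 127:
--             return "Reserved for Loopback (Not a valid class)"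
--         elif 128 <= first_octet <= 191:
--             return "Class B"
--         elif 192 <= first_octet <= 223:
--             return "Class C"
--         elif 224 <= first_octet <= 239:
--             return "Class D (Multicast)"
--         elif 240 <= first_octet <= 255:
--             return "Class E (Experimental)"
--         else:
--             return "Invalid IP address!"
--
--     except:
--         return "Invalid IP address! Please enter correctly."
-- ===== SOURCE B (Python) =====
-- def identify_ip_class(ip):
--     # Single pass over the characters: split, format check and octet validation
--     # are interleaved into one scan instead of split() + a separate loop,
--     # and the class is picked by counting range thresholds into a label tuple.
--     dots = 0
--     valid = True
--     seg = ''
--     first = ''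
--     for ch in ip:
--         if ch == '.':
--             if not (seg.isdigit() and 0 <= int(seg) <= 255):
--                 valid = False
--             if dots == 0:
--                 first = seg
--             dots += 1
--             seg = ''
--         else:
--             seg += ch
--     if not (seg.isdigit() and 0 <= int(seg) <= 255):
--         valid = False
--     if dots != 3:
--         return "Invalid IP address format!"
--     if not valid:
--         return "Invalid IP address! Each octet must be between 0 and 255."
--     n = int(first)
--     idx = (n >= 1) + (n >= 127) + (n >= 128) + (n >= 192) + (n >= 224) + (n >= 240)
--     return ("Invalid IP address!",
--             "Class A",
--             "Reserved for Loopback (Not a valid class)",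
--             "Class B",
--             "Class C",
--             "Class D (Multicast)",
--             "Class E (Experimental)")[idx]
-- ===== Notes on version B (the rewrite author's own statement) =====
-- stated objective: alternative
-- what changed: Replaced split()+separate validation loop+if/elif cascade by a single character scan that splits, counts dots and validates octets in one pass with an accumulator, and picks the class by counting range thresholds below the first octet and indexing a label tuple.
import Mathlib
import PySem

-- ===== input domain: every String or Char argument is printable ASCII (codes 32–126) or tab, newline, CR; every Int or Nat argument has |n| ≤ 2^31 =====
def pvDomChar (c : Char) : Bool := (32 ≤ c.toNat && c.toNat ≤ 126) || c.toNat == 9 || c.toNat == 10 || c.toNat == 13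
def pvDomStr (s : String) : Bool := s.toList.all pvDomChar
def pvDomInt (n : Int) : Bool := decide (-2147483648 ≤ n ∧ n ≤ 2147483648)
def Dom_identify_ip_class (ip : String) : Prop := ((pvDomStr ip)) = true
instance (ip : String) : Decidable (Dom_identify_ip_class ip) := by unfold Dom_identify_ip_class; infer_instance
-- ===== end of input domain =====

-- B replaces A's split()+validation-loop+if/elif cascade by a single character scan that splits,
-- counts dots and validates octets in one pass, classifying by counting range thresholds
-- (objective: alternative decomposition, same cost).

-- ===== PORT A =====
-- int(octet); A only evaluates it after octet.isdigit() succeeds, where int() cannot raise,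
-- so the .getD 0 default is never the value Python computes with
def pvOctetInt (o : String) : Int := (PySem.Int.ofStr? o).getD 0

-- A's 'for octet in octets: if not octet.isdigit() or not 0 <= int(octet) <= 255: return …'
-- (some msg = early return)
def pvCheckOctets : List String → Option String
  | [] => none
  | o :: rest =>
    if !(PySem.Str.strIsdigit o) || !(decide (0 ≤ pvOctetInt o ∧ pvOctetInt o ≤ 255)) then
      some "Invalid IP address! Each octet must be between 0 and 255."
    else pvCheckOctets rest

def identify_ip_class (ip : String) : String :=
  -- ip.split('.'): the separator is nonempty, so split? is always some and the getD [] is exact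
  let octets := (PySem.Str.split? ip ".").getD []
  if octets.length ≠ 4 then "Invalid IP address format!"
  else
    match pvCheckOctets octets with
    | some msg => msg
    | none =>
      let first_octet := pvOctetInt (PySem.List.pyGetD octets 0 "")
      if 1 ≤ first_octet ∧ first_octet ≤ 126 then "Class A"
      else if first_octet = 127 then "Reserved for Loopback (Not a valid class)"
      else if 128 ≤ first_octet ∧ first_octet ≤ 191 then "Class B"
      else if 192 ≤ first_octet ∧ first_octet ≤ 223 then "Class C"
      else if 224 ≤ first_octet ∧ first_octet ≤ 239 then "Class D (Multicast)"
      else if 240 ≤ first_octet ∧ first_octet ≤ 255 then "Class E (Experimental)"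
      else "Invalid IP address!"

-- ===== PORT B =====
-- Source B's 'seg.isdigit() and 0 <= int(seg) <= 255'; int() is only reached when isdigit holds
-- (Bool && short-circuits like Python's and), so the .getD 0 default is never Python's value
def pvSegOk (seg : List Char) : Bool :=
  PySem.Chars.strIsdigit seg &&
    decide (0 ≤ (PySem.Int.ofChars? seg).getD 0 ∧ (PySem.Int.ofChars? seg).getD 0 ≤ 255)

-- one iteration of Source B's for-loop body; state = (dots, valid, seg, first), seg/first as char lists
def pvStep (st : Nat × Bool × List Char × List Char) (c : Char) : Nat × Bool × List Char × List Char :=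
  match st with
  | (dots, valid, seg, first) =>
    if c == '.' then
      (dots + 1, valid && pvSegOk seg, [], if dots = 0 then seg else first)
    else
      (dots, valid, seg ++ [c], first)

-- Source B's 'for ch in ip:' loop
def pvLoop : List Char → (Nat × Bool × List Char × List Char) → Nat × Bool × List Char × List Char
  | [], st => st
  | c :: cs, st => pvLoop cs (pvStep st c)

-- Source B's label tuple
def pvLabels : List String :=
  ["Invalid IP address!",
   "Class A",
   "Reserved for Loopback (Not a valid class)",
   "Class B",
   "Class C",
   "Class D (Multicast)",
   "Class E (Experimental)"]

def identify_ip_class_alt (ip : String) : String :=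
  let st := pvLoop ip.toList (0, true, [], [])
  let dots := st.1
  let valid := st.2.1 && pvSegOk st.2.2.1   -- trailing-segment check after the loop
  if dots ≠ 3 then "Invalid IP address format!"
  else if !valid then "Invalid IP address! Each octet must be between 0 and 255."
  else
    let n := (PySem.Int.ofChars? st.2.2.2).getD 0
    let idx : Int :=
      (if 1 ≤ n then 1 else 0) + (if 127 ≤ n then 1 else 0) + (if 128 ≤ n then 1 else 0) +
      (if 192 ≤ n then 1 else 0) + (if 224 ≤ n then 1 else 0) + (if 240 ≤ n then 1 else 0)
    -- tuple[idx]: idx is always within 0..6, so Python never raises and the default is unused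
    PySem.List.pyGetD pvLabels idx ""

-- ===== PRECONDITION & SPEC =====
def Spec_identify_ip_class (ip : String) (out : String) : Prop := out = identify_ip_class_alt ip
instance (ip : String) (out : String) : Decidable (Spec_identify_ip_class ip out) := by unfold Spec_identify_ip_class; infer_instance

-- ===== CLAIM (what is proved, stated in full; the proofs are below) =====
def Claim_equal_identify_ip_class : Prop := ∀ (ip : String), Dom_identify_ip_class ip → Spec_identify_ip_class ip (identify_ip_class ip)

-- ===== LEMMAS AND PROOFS =====

-- PySem's fuelled splitOn on the one-character separator '.' is List.splitOnP (· == '.')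
theorem pv_go_spec (l : List Char) : ∀ (fuel : Nat) (cur : List Char) (acc : List (List Char)),
    l.length < fuel →
    PySem.Chars.splitOn.go ['.'] fuel l cur acc =
      acc.reverse ++ List.modifyHead (cur.reverse ++ ·) (List.splitOnP (· == '.') l) := by
  induction l with
  | nil =>
    intro fuel cur acc h
    match fuel, h with
    | fuel + 1, _ =>
      rw [PySem.Chars.splitOn.go.eq_def]
      simp [List.splitOnP_nil]
  | cons c rest ih =>
    intro fuel cur acc h
    match fuel, h with
    | fuel + 1, h =>
      rw [PySem.Chars.splitOn.go.eq_def]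
      simp only [List.splitOnP_cons]
      have hp : (['.'].isPrefixOf (c :: rest)) = ('.' == c) := by
        simp [List.isPrefixOf]
      rw [hp]
      by_cases hc : c = '.'
      · subst hc
        simp only [beq_self_eq_true, if_pos, List.length_cons] at h ⊢
        show PySem.Chars.splitOn.go ['.'] fuel rest [] (cur.reverse :: acc) = _
        rw [ih fuel [] (cur.reverse :: acc) (by omega)]
        obtain ⟨s, r, hsr⟩ : ∃ s r, List.splitOnP (· == '.') rest = s :: r := by
          rcases hS : List.splitOnP (· == '.') rest with _ | ⟨s, r⟩
          · exact absurd hS (List.splitOnP_ne_nil _ _)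
          · exact ⟨s, r, rfl⟩
        simp [hsr]
      · have hcb : ('.' == c) = false := by simpa [beq_iff_eq] using fun h' => hc h'.symm
        rw [hcb]
        simp only [Bool.false_eq_true, if_false]
        rw [ih fuel (c :: cur) acc (by simpa using Nat.lt_of_succ_lt_succ h)]
        have hcb2 : ((c == '.') : Bool) = false := by simpa [beq_iff_eq] using hc
        rw [hcb2]
        simp only [Bool.false_eq_true, if_false]
        obtain ⟨s, r, hsr⟩ : ∃ s r, List.splitOnP (· == '.') rest = s :: r := by
          rcases hS : List.splitOnP (· == '.') rest with _ | ⟨s, r⟩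
          · exact absurd hS (List.splitOnP_ne_nil _ _)
          · exact ⟨s, r, rfl⟩
        simp [hsr]

theorem pv_splitOn_eq (cs : List Char) :
    PySem.Chars.splitOn cs ['.'] = List.splitOnP (· == '.') cs := by
  rw [PySem.Chars.splitOn]
  rw [pv_go_spec cs (cs.length + 1) [] [] (by omega)]
  obtain ⟨s, r, hsr⟩ : ∃ s r, List.splitOnP (· == '.') cs = s :: r := by
    rcases hS : List.splitOnP (· == '.') cs with _ | ⟨s, r⟩
    · exact absurd hS (List.splitOnP_ne_nil _ _)
    · exact ⟨s, r, rfl⟩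
  simp [hsr]

-- spec-side view of B's scan: the loop, replayed segment by segment
def pvRunSegs : List (List Char) → Nat → Bool → List Char → List Char → Nat × Bool × List Char × List Char
  | [], d, v, seg, f => (d, v, seg, f)
  | [s], d, v, seg, f => (d, v, seg ++ s, f)
  | s :: s' :: rest, d, v, seg, f =>
      pvRunSegs (s' :: rest) (d + 1) (v && pvSegOk (seg ++ s)) [] (if d = 0 then seg ++ s else f)


theorem pvLoop_eq_runSegs (cs : List Char) :
    ∀ (d : Nat) (v : Bool) (seg f : List Char),
    pvLoop cs (d, v, seg, f) = pvRunSegs (List.splitOnP (· == '.') cs) d v seg f := by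
  induction cs with
  | nil => intro d v seg f; simp [pvLoop, List.splitOnP_nil, pvRunSegs]
  | cons c cs ih =>
    intro d v seg f
    rw [List.splitOnP_cons]
    by_cases hc : c = '.'
    · subst hc
      simp only [beq_self_eq_true, if_pos]
      show pvLoop cs (pvStep (d, v, seg, f) '.') = _
      rw [pvStep]
      simp only [beq_self_eq_true, if_pos]
      rw [ih]
      obtain ⟨s, r, hsr⟩ : ∃ s r, List.splitOnP (· == '.') cs = s :: r := by
        rcases hS : List.splitOnP (· == '.') cs with _ | ⟨s, r⟩
        · exact absurd hS (List.splitOnP_ne_nil _ _)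
        · exact ⟨s, r, rfl⟩
      rw [hsr, pvRunSegs]
      simp
    · have hcb : ((c == '.') : Bool) = false := by simpa [beq_iff_eq] using hc
      rw [hcb]
      simp only [Bool.false_eq_true, if_false]
      show pvLoop cs (pvStep (d, v, seg, f) c) = _
      rw [pvStep]
      rw [hcb]
      simp only [Bool.false_eq_true, if_false]
      rw [ih]
      obtain ⟨s, r, hsr⟩ : ∃ s r, List.splitOnP (· == '.') cs = s :: r := by
        rcases hS : List.splitOnP (· == '.') cs with _ | ⟨s, r⟩
        · exact absurd hS (List.splitOnP_ne_nil _ _)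
        · exact ⟨s, r, rfl⟩
      rw [hsr]
      rcases r with _ | ⟨s', r'⟩
      · simp [pvRunSegs]
      · simp [pvRunSegs]

theorem pvRunSegs_dots (S : List (List Char)) :
    ∀ (d : Nat) (v : Bool) (seg f : List Char),
    (pvRunSegs S d v seg f).1 = d + (S.length - 1) := by
  induction S with
  | nil => intro d v seg f; simp [pvRunSegs]
  | cons s r ih =>
    intro d v seg f
    rcases r with _ | ⟨s', r'⟩
    · simp [pvRunSegs]
    · rw [pvRunSegs, ih]
      simp
      omega

-- A's if/elif cascade = B's threshold count indexed into the label tuple, for a valid first octet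
theorem pv_classify (n : Int) (h0 : 0 ≤ n) (h1 : n ≤ 255) :
    (if 1 ≤ n ∧ n ≤ 126 then "Class A"
     else if n = 127 then "Reserved for Loopback (Not a valid class)"
     else if 128 ≤ n ∧ n ≤ 191 then "Class B"
     else if 192 ≤ n ∧ n ≤ 223 then "Class C"
     else if 224 ≤ n ∧ n ≤ 239 then "Class D (Multicast)"
     else if 240 ≤ n ∧ n ≤ 255 then "Class E (Experimental)"
     else "Invalid IP address!") =
    PySem.List.pyGetD pvLabels
      ((if 1 ≤ n then 1 else 0) + (if 127 ≤ n then 1 else 0) + (if 128 ≤ n then 1 else 0) +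
       (if 192 ≤ n then 1 else 0) + (if 224 ≤ n then 1 else 0) + (if 240 ≤ n then 1 else 0)) "" := by
  split_ifs <;> first | omega | (norm_num; rfl)

-- A's per-octet test on the String octet = B's per-segment test on its characters
theorem pv_segOk_eq (s : List Char) :
    pvSegOk s =
      (PySem.Str.strIsdigit (String.ofList s) &&
        decide (0 ≤ pvOctetInt (String.ofList s) ∧ pvOctetInt (String.ofList s) ≤ 255)) := by
  rw [pvSegOk, pvOctetInt, PySem.Int.ofStr?_ofList, PySem.Str.strIsdigit_eq, String.toList_ofList]

-- A's per-octet early-return condition is the negation of B's segment test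
theorem pv_check_cond (s : List Char) :
    (!(PySem.Str.strIsdigit (String.ofList s)) ||
      !(decide (0 ≤ pvOctetInt (String.ofList s) ∧ pvOctetInt (String.ofList s) ≤ 255))) =
    !(pvSegOk s) := by
  rw [pv_segOk_eq, Bool.not_and]

-- the whole computation, as a function of the list of octet character-lists
theorem pv_main (S : List (List Char)) :
    (let octets := S.map String.ofList
     if octets.length ≠ 4 then "Invalid IP address format!"
     else
       match pvCheckOctets octets with
       | some msg => msg
       | none =>
         let first_octet := pvOctetInt (PySem.List.pyGetD octets 0 "")
         if 1 ≤ first_octet ∧ first_octet ≤ 126 then "Class A"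
         else if first_octet = 127 then "Reserved for Loopback (Not a valid class)"
         else if 128 ≤ first_octet ∧ first_octet ≤ 191 then "Class B"
         else if 192 ≤ first_octet ∧ first_octet ≤ 223 then "Class C"
         else if 224 ≤ first_octet ∧ first_octet ≤ 239 then "Class D (Multicast)"
         else if 240 ≤ first_octet ∧ first_octet ≤ 255 then "Class E (Experimental)"
         else "Invalid IP address!") =
    (let st := pvRunSegs S 0 true [] []
     let dots := st.1
     let valid := st.2.1 && pvSegOk st.2.2.1
     if dots ≠ 3 then "Invalid IP address format!"
     else if !valid then "Invalid IP address! Each octet must be between 0 and 255."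
     else
       let n := (PySem.Int.ofChars? st.2.2.2).getD 0
       let idx : Int :=
         (if 1 ≤ n then 1 else 0) + (if 127 ≤ n then 1 else 0) + (if 128 ≤ n then 1 else 0) +
         (if 192 ≤ n then 1 else 0) + (if 224 ≤ n then 1 else 0) + (if 240 ≤ n then 1 else 0)
       PySem.List.pyGetD pvLabels idx "") := by
  by_cases hl : S.length = 4
  · match S, hl with
    | [a, b, c, d], _ =>
      have hrun : pvRunSegs [a, b, c, d] 0 true [] [] =
          (3, ((true && pvSegOk a) && pvSegOk b) && pvSegOk c, d, a) := by
        simp [pvRunSegs]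
      simp only [hrun, List.map_cons, List.map_nil, List.length_cons, List.length_nil,
        pvCheckOctets, pv_check_cond]
      by_cases ha : pvSegOk a
      · by_cases hb : pvSegOk b
        · by_cases hcv : pvSegOk c
          · by_cases hd : pvSegOk d
            · have hbound : 0 ≤ (PySem.Int.ofChars? a).getD 0 ∧
                  (PySem.Int.ofChars? a).getD 0 ≤ 255 := by
                rw [pv_segOk_eq] at ha
                have h2 := of_decide_eq_true ((Bool.and_eq_true _ _).mp ha).2
                rwa [pvOctetInt, PySem.Int.ofStr?_ofList] at h2
              have hget : pvOctetInt (PySem.List.pyGetD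
                  [String.ofList a, String.ofList b, String.ofList c, String.ofList d] 0 "") =
                  (PySem.Int.ofChars? a).getD 0 := by
                simp [PySem.List.pyGetD, pvOctetInt, PySem.Int.ofStr?_ofList]
              simp only [ha, hb, hcv, hd, Bool.not_true, Bool.false_eq_true, if_false,
                Bool.and_self, hget]
              rw [pv_classify _ hbound.1 hbound.2]
              simp
            · simp [ha, hb, hcv, hd]
          · simp [ha, hb, hcv]
        · simp [ha, hb]
      · simp [ha]
  · show (if _ then _ else _) = (if _ then _ else _)
    rw [if_pos (by simpa using hl)]
    rw [if_pos (by rw [pvRunSegs_dots]; omega)]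

-- ===== VERDICT (by name: the statement is the Claim_ definition above) =====
theorem identify_ip_class_spec : Claim_equal_identify_ip_class := by
  intro ip _
  show identify_ip_class ip = identify_ip_class_alt ip
  have hsplit : (PySem.Str.split? ip ".").getD [] =
      (List.splitOnP (· == '.') ip.toList).map String.ofList := by
    have h1 := PySem.Str.split?_map ip "."
    rw [show (".".toList) = ['.'] from rfl] at h1
    have h2 : PySem.Chars.split? ip.toList ['.'] =
        some (List.splitOnP (· == '.') ip.toList) := by
      rw [PySem.Chars.split?]
      simp [pv_splitOn_eq]
    rw [h2] at h1
    rcases hL : PySem.Str.split? ip "." with _ | L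
    · rw [hL] at h1; simp at h1
    · rw [hL] at h1
      simp only [Option.map_some, Option.some.injEq] at h1
      have : L = (L.map String.toList).map String.ofList := by
        rw [List.map_map]
        have : ∀ x ∈ L, (String.ofList ∘ String.toList) x = id x := by
          intro x _; simp [Function.comp]
        rw [List.map_congr_left this, List.map_id]
      simp only [Option.getD_some]
      rw [this, h1]
  rw [identify_ip_class, identify_ip_class_alt]
  simp only [hsplit]
  have hloop : pvLoop ip.toList (0, true, [], []) =
      pvRunSegs (List.splitOnP (· == '.') ip.toList) 0 true [] [] :=
    pvLoop_eq_runSegs ip.toList 0 true [] []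
  simp only [hloop]
  exact pv_main (List.splitOnP (· == '.') ip.toList)
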